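-- pv_equiv track=rewrite | github.com/MolotokMephi/StarVision | backend/tests/test_error_sanitization.py | _has_raw_exception_marker
-- ===== SOURCE A (Python) =====
-- def _has_raw_exception_marker(value) -> bool:
--     """A naive guard: real exception strings from Python typically
--     include a class name + colon ("RuntimeError: ..."), file paths,
--     or line-number markers. None of these should appear in a response."""
--     if not isinstance(value, str):
--         return False
--     bad_markers = [
--         "Traceback", "File \"", "line ",
--         "Error:", "Exception:", "RuntimeError", "ValueError",
--         "<class ", "object at 0x",
--     ]
--     return any(m in value for m in bad_markers)
-- ===== SOURCE B (Python) =====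
-- _MARKERS = (
--     "Traceback", "File \"", "line ",
--     "Error:", "Exception:", "RuntimeError", "ValueError",
--     "<class ", "object at 0x",
-- )
--
--
-- def _has_raw_exception_marker(value) -> bool:
--     if not isinstance(value, str):
--         return False
--     # single left-to-right pass: at each position, does some marker start here?
--     return any(value.startswith(_MARKERS, i) for i in range(len(value) + 1))
-- ===== Notes on version B (the rewrite author's own statement) =====
-- stated objective: alternative
-- what changed: Instead of nine independent substring scans ('m in value' per marker), B makes one left-to-right pass over the string and at each position asks whether any marker starts there (one tuple-startswith call per position).
import Mathlib
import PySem

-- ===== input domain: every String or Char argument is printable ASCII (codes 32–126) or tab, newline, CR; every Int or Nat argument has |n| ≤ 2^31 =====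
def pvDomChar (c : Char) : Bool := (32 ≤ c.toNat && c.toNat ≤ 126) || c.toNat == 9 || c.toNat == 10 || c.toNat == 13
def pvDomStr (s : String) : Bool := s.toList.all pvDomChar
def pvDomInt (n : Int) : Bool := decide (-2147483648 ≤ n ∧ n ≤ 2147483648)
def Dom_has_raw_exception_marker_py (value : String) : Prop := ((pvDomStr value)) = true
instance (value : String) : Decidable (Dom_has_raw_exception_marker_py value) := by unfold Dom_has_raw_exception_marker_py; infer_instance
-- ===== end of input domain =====

-- B replaces the nine per-marker substring scans with one left-to-right pass that
-- checks at each position whether some marker starts there (objective: alternative).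


-- ===== PORT A =====
def pvBadMarkers : List String :=
  ["Traceback", "File \"", "line ",
   "Error:", "Exception:", "RuntimeError", "ValueError",
   "<class ", "object at 0x"]

def has_raw_exception_marker_py (value : String) : Bool :=
  pvBadMarkers.any (fun m => PySem.Str.isIn m value)

-- ===== PORT B =====
def pvMarkerChars : List (List Char) :=
  ["Traceback".toList, "File \"".toList, "line ".toList,
   "Error:".toList, "Exception:".toList, "RuntimeError".toList, "ValueError".toList,
   "<class ".toList, "object at 0x".toList]

-- the positional pass: for each suffix (position i), does some marker start here?
def pvScan : List Char → Bool
  | [] => pvMarkerChars.any (fun m => PySem.Chars.startswith [] m)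
  | c :: t => pvMarkerChars.any (fun m => PySem.Chars.startswith (c :: t) m) || pvScan t

def has_raw_exception_marker_py_alt (value : String) : Bool :=
  pvScan value.toList

-- ===== PRECONDITION & SPEC =====
def Spec_has_raw_exception_marker_py (value : String) (out : Bool) : Prop := out = has_raw_exception_marker_py_alt value
instance (value : String) (out : Bool) : Decidable (Spec_has_raw_exception_marker_py value out) := by unfold Spec_has_raw_exception_marker_py; infer_instance

-- ===== CLAIM (what is proved, stated in full; the proofs are below) =====
def Claim_equal_has_raw_exception_marker_py : Prop := ∀ (value : String), Dom_has_raw_exception_marker_py value → Spec_has_raw_exception_marker_py value (has_raw_exception_marker_py value)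

-- ===== LEMMAS AND PROOFS =====

lemma pvScan_iff (cs : List Char) : pvScan cs = true ↔ ∃ m ∈ pvMarkerChars, m <:+: cs := by
  induction cs with
  | nil =>
      simp [pvScan, List.any_eq_true, PySem.Chars.startswith_iff]
  | cons c t ih =>
      simp only [pvScan, Bool.or_eq_true, List.any_eq_true,
        PySem.Chars.startswith_iff, ih, List.infix_cons_iff]
      constructor
      · rintro (⟨m, hm, hp⟩ | ⟨m, hm, hi⟩)
        · exact ⟨m, hm, Or.inl hp⟩
        · exact ⟨m, hm, Or.inr hi⟩
      · rintro ⟨m, hm, hp | hi⟩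
        · exact Or.inl ⟨m, hm, hp⟩
        · exact Or.inr ⟨m, hm, hi⟩

-- ===== VERDICT (by name: the statement is the Claim_ definition above) =====
theorem has_raw_exception_marker_py_spec : Claim_equal_has_raw_exception_marker_py := by
  intro value _
  unfold Spec_has_raw_exception_marker_py has_raw_exception_marker_py has_raw_exception_marker_py_alt
  rw [Bool.eq_iff_iff, pvScan_iff]
  simp [PySem.Str.isIn_eq, PySem.Chars.isIn_iff_infix, pvBadMarkers, pvMarkerChars]
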